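-- pv_equiv track=rewrite | github.com/Momona-Wada/starbucks-calorie-predictor | backend/add_score.py | parse_beverage_prep
-- ===== SOURCE A (Python) =====
-- def parse_beverage_prep(bp):
--     sizes = ["Short", "Tall", "Grande", "Venti"]
--     bp = str(bp).strip()
--     size = None
--     milk = bp
--     for s in sizes:
--         if bp.startswith(s):
--             size = s
--             milk = bp[len(s):].strip()
--             break
--     return size, milk
-- ===== SOURCE B (Python) =====
-- _SIZE_BY_INITIAL = {"S": "Short", "T": "Tall", "G": "Grande", "V": "Venti"}
--
-- def parse_beverage_prep(bp):
--     bp = str(bp).strip()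
--     cand = _SIZE_BY_INITIAL.get(bp[:1])
--     if cand is not None and bp.startswith(cand):
--         return cand, bp[len(cand):].strip()
--     return None, bp
-- ===== Notes on version B (the rewrite author's own statement) =====
-- stated objective: alternative
-- what changed: Replaces the linear scan over the four size prefixes with a single hash-dispatch on the first character (the four sizes have distinct initials), so at most one startswith test runs instead of up to four.
import Mathlib
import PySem

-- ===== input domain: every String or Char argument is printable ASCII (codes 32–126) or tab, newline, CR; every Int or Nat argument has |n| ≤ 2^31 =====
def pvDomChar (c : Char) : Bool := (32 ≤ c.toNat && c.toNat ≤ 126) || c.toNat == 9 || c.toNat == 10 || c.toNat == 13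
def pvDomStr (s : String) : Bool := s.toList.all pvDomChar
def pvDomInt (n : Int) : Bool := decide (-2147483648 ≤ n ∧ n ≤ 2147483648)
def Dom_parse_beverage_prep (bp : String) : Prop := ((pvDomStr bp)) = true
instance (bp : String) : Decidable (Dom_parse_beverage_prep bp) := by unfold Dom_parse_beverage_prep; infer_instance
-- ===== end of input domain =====

-- B replaces A's linear scan over the four size prefixes with a dict dispatch on the first
-- character (the four size names have distinct initials): alternative decomposition, at most
-- one startswith test instead of up to four.

-- ===== PORT A =====
-- the for-loop with break: first matching size wins, falling through leaves (None, bp)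
def pvALoop (bp : String) : List String → Option String × String
  | [] => (none, bp)
  | s :: rest =>
      if PySem.Str.startswith bp s then
        (some s, PySem.Str.strip (PySem.Str.slice bp (some (PySem.Str.len s)) none))
      else pvALoop bp rest

def parse_beverage_prep (bp : String) : Option String × String :=
  let sizes : List String := ["Short", "Tall", "Grande", "Venti"]
  let bp := PySem.Str.strip bp
  pvALoop bp sizes

-- ===== PORT B =====
def pvSizeByInitial : PySem.Dict String String :=
  PySem.Dict.ofList [("S", "Short"), ("T", "Tall"), ("G", "Grande"), ("V", "Venti")]

def parse_beverage_prep_alt (bp : String) : Option String × String :=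
  let bp := PySem.Str.strip bp
  match PySem.Dict.get? pvSizeByInitial (PySem.Str.slice bp none (some 1)) with
  | some cand =>
      if PySem.Str.startswith bp cand then
        (some cand, PySem.Str.strip (PySem.Str.slice bp (some (PySem.Str.len cand)) none))
      else (none, bp)
  | none => (none, bp)

-- ===== PRECONDITION & SPEC =====
def Spec_parse_beverage_prep (bp : String) (out : Option String × String) : Prop := out = parse_beverage_prep_alt bp
instance (bp : String) (out : Option String × String) : Decidable (Spec_parse_beverage_prep bp out) := by unfold Spec_parse_beverage_prep; infer_instance

-- ===== CLAIM (what is proved, stated in full; the proofs are below) =====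
def Claim_equal_parse_beverage_prep : Prop := ∀ (bp : String), Dom_parse_beverage_prep bp → Spec_parse_beverage_prep bp (parse_beverage_prep bp)

-- ===== LEMMAS AND PROOFS =====

theorem pv_slice_one (t : String) : PySem.Str.slice t none (some 1) = String.ofList (t.toList.take 1) := by
  apply String.toList_inj.mp
  simp [PySem.Str.toList_slice, PySem.Chars.slice_eq_listSlice, PySem.List.slice_to]

theorem pv_key_beq_false (d c : Char) (h : ¬ c = d) :
    ((String.ofList [d] : String) == String.ofList [c]) = false := by
  rw [Bool.eq_false_iff]
  intro hb
  have he := eq_of_beq hb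
  rw [String.ofList_inj] at he
  simp only [List.cons.injEq, and_true] at he
  exact h he.symm

theorem pv_swc_false (c : Char) (cs : List Char) (p : List Char) (d : Char)
    (hd : p.head? = some d) (h : ¬ d = c) : PySem.Chars.startswith (c :: cs) p = false := by
  rw [Bool.eq_false_iff]
  intro hsw
  rcases (PySem.Chars.startswith_iff _ _).mp hsw with ⟨u, hu⟩
  cases p with
  | nil => simp at hd
  | cons e es =>
      simp only [List.head?_cons, Option.some.injEq] at hd
      rw [List.cons_append] at hu
      injection hu with h1 _
      exact h (hd ▸ h1)

theorem pv_swc_false_nil (p : List Char) (d : Char) (hd : p.head? = some d) :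
    PySem.Chars.startswith ([] : List Char) p = false := by
  rw [Bool.eq_false_iff]
  intro hsw
  rcases (PySem.Chars.startswith_iff _ _).mp hsw with ⟨u, hu⟩
  rcases (List.append_eq_nil_iff.mp hu).1 with rfl
  simp at hd

theorem pv_main (t : String) :
    pvALoop t ["Short", "Tall", "Grande", "Venti"] =
      (match PySem.Dict.get? pvSizeByInitial (PySem.Str.slice t none (some 1)) with
       | some cand =>
           if PySem.Str.startswith t cand then
             (some cand, PySem.Str.strip (PySem.Str.slice t (some (PySem.Str.len cand)) none))
           else (none, t)
       | none => (none, t)) := by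
  rw [pv_slice_one]
  cases hl : t.toList with
  | nil =>
      have g : PySem.Dict.get? pvSizeByInitial (String.ofList (([] : List Char).take 1)) = none := by decide
      rw [g]
      simp only [pvALoop, PySem.Str.startswith_eq, hl]
      rw [pv_swc_false_nil "Short".toList 'S' rfl, pv_swc_false_nil "Tall".toList 'T' rfl,
        pv_swc_false_nil "Grande".toList 'G' rfl, pv_swc_false_nil "Venti".toList 'V' rfl]
      simp
  | cons c cs =>
      simp only [List.take_succ_cons, List.take_zero]
      by_cases hS : c = 'S'
      · subst hS
        have g : PySem.Dict.get? pvSizeByInitial (String.ofList ['S']) = some "Short" := by decide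
        rw [g]
        simp only [pvALoop, PySem.Str.startswith_eq, hl]
        rw [pv_swc_false 'S' cs "Tall".toList 'T' rfl (by decide),
          pv_swc_false 'S' cs "Grande".toList 'G' rfl (by decide),
          pv_swc_false 'S' cs "Venti".toList 'V' rfl (by decide)]
        by_cases hsw : PySem.Chars.startswith ('S' :: cs) "Short".toList = true <;> simp [hsw]
      · by_cases hT : c = 'T'
        · subst hT
          have g : PySem.Dict.get? pvSizeByInitial (String.ofList ['T']) = some "Tall" := by decide
          rw [g]
          simp only [pvALoop, PySem.Str.startswith_eq, hl]
          rw [pv_swc_false 'T' cs "Short".toList 'S' rfl (by decide),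
            pv_swc_false 'T' cs "Grande".toList 'G' rfl (by decide),
            pv_swc_false 'T' cs "Venti".toList 'V' rfl (by decide)]
          by_cases hsw : PySem.Chars.startswith ('T' :: cs) "Tall".toList = true <;> simp [hsw]
        · by_cases hG : c = 'G'
          · subst hG
            have g : PySem.Dict.get? pvSizeByInitial (String.ofList ['G']) = some "Grande" := by decide
            rw [g]
            simp only [pvALoop, PySem.Str.startswith_eq, hl]
            rw [pv_swc_false 'G' cs "Short".toList 'S' rfl (by decide),
              pv_swc_false 'G' cs "Tall".toList 'T' rfl (by decide),
              pv_swc_false 'G' cs "Venti".toList 'V' rfl (by decide)]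
            by_cases hsw : PySem.Chars.startswith ('G' :: cs) "Grande".toList = true <;> simp [hsw]
          · by_cases hV : c = 'V'
            · subst hV
              have g : PySem.Dict.get? pvSizeByInitial (String.ofList ['V']) = some "Venti" := by decide
              rw [g]
              simp only [pvALoop, PySem.Str.startswith_eq, hl]
              rw [pv_swc_false 'V' cs "Short".toList 'S' rfl (by decide),
                pv_swc_false 'V' cs "Tall".toList 'T' rfl (by decide),
                pv_swc_false 'V' cs "Grande".toList 'G' rfl (by decide)]
              by_cases hsw : PySem.Chars.startswith ('V' :: cs) "Venti".toList = true <;> simp [hsw]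
            · -- c matches no size initial: the dict lookup misses and every startswith is false
              have g : PySem.Dict.get? pvSizeByInitial (String.ofList [c]) = none := by
                simp only [pvSizeByInitial, PySem.Dict.get?, PySem.Dict.ofList,
                  PySem.Dict.update, PySem.Dict.empty, PySem.Dict.insert]
                rw [show ("S" : String) = String.ofList ['S'] from rfl,
                  show ("T" : String) = String.ofList ['T'] from rfl,
                  show ("G" : String) = String.ofList ['G'] from rfl,
                  show ("V" : String) = String.ofList ['V'] from rfl]
                simp [List.find?, pv_key_beq_false 'S' c hS, pv_key_beq_false 'T' c hT,
                  pv_key_beq_false 'G' c hG, pv_key_beq_false 'V' c hV]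
              rw [g]
              simp only [pvALoop, PySem.Str.startswith_eq, hl]
              rw [pv_swc_false c cs "Short".toList 'S' rfl (fun e => hS e.symm),
                pv_swc_false c cs "Tall".toList 'T' rfl (fun e => hT e.symm),
                pv_swc_false c cs "Grande".toList 'G' rfl (fun e => hG e.symm),
                pv_swc_false c cs "Venti".toList 'V' rfl (fun e => hV e.symm)]
              simp

-- ===== VERDICT (by name: the statement is the Claim_ definition above) =====
theorem parse_beverage_prep_spec : Claim_equal_parse_beverage_prep := by
  intro bp _
  unfold Spec_parse_beverage_prep parse_beverage_prep parse_beverage_prep_alt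
  exact pv_main (PySem.Str.strip bp)
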